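-- pv_equiv track=rewrite | github.com/nstalways/Algorithm-Questions | 01_Strings/BOJ_5430.py | solution
-- ===== SOURCE A (Python) =====
-- from collections import deque
--
-- def solution(p, n, arr):
--     if arr[0] == '':
--         arr = []
--
--     arr = deque(arr)
--     direction = 0 # 0: forward, 1: backward
--     for op in p:
--         if op == 'R':
--             direction = not direction
--
--         else:
--             if direction == 0: # forward
--                 try:
--                     arr.popleft()
--                 except:
--                     return 'error'
--
--             else: # backward
--                 try:
--                     arr.pop()
--                 except:
--                     return 'error'
--
--     if not arr:
--         return '[]'
--
--     arr = list(arr)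
--     if direction == 1:
--         arr = arr[::-1]
--
--     arr[0] = '[' + arr[0]
--     arr[-1] = arr[-1] + ']'
--
--     return ','.join(arr)
-- ===== SOURCE B (Python) =====
-- def solution(p, n, arr):
--     if arr[0] == '':
--         arr = []
--
--     backward = False
--     front = back = 0
--     for op in p:
--         if op == 'R':
--             backward = not backward
--         elif backward:
--             back += 1
--         else:
--             front += 1
--
--     if front + back > len(arr):
--         return 'error'
--
--     window = arr[front:len(arr) - back]
--     if not window:
--         return '[]'
--     if backward:
--         window = window[::-1]
--     return '[' + ','.join(window) + ']'
-- ===== Notes on version B (the rewrite author's own statement) =====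
-- stated objective: simpler
-- what changed: B replaces A's deque simulation that pops one element per 'D' (with try/except for the error case) by a single pass over p counting front/back drops and the reversal parity, then one arithmetic error check and one slice.
import Mathlib
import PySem

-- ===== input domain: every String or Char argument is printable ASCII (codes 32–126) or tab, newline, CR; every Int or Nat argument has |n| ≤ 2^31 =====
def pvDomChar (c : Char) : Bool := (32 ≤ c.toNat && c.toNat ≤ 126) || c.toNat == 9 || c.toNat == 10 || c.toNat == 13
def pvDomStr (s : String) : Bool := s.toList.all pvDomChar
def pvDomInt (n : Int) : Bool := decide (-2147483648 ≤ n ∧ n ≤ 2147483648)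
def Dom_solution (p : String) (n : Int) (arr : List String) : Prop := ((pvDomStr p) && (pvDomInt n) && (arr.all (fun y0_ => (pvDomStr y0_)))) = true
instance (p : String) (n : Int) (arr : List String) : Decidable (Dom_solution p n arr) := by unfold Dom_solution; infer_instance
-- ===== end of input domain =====

-- B replaces A's element-by-element deque popping by counting front/back drops in one
-- pass and slicing once (objective: simpler).

-- ===== PORT A =====
-- arr[-1] = arr[-1] + ']'  (A only reaches this on a nonempty list)
def modLast (l : List String) : List String :=
  match l with
  | [] => []
  | [s] => [s ++ "]"]
  | s :: t => s :: modLast t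

-- the for-loop over p: deque popping with mid-loop 'error' return (none = 'error')
def aLoop : List Char → Bool → List String → Option (Bool × List String)
  | [], d, xs => some (d, xs)
  | c :: cs, d, xs =>
    if c = 'R' then aLoop cs (!d) xs
    else if d then
      match xs with
      | [] => none
      | _ :: _ => aLoop cs d xs.dropLast
    else
      match xs with
      | [] => none
      | _ :: t => aLoop cs d t

def solution (p : String) (n : Int) (arr : List String) : String :=
  let arr1 := if arr.head? = some "" then [] else arr
  match aLoop p.toList false arr1 with
  | none => "error"
  | some (d, xs) =>
    if xs.isEmpty then "[]"
    else
      let ys := if d then xs.reverse else xs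
      PySem.Str.join "," (modLast (ys.modifyHead (fun s => "[" ++ s)))

-- ===== PORT B =====
def solution_alt (p : String) (n : Int) (arr : List String) : String :=
  let arr1 := if arr.head? = some "" then [] else arr
  let st := p.toList.foldl (fun (st : Bool × Nat × Nat) c =>
      if c = 'R' then (!st.1, st.2.1, st.2.2)
      else if st.1 then (st.1, st.2.1, st.2.2 + 1)
      else (st.1, st.2.1 + 1, st.2.2)) (false, 0, 0)
  if arr1.length < st.2.1 + st.2.2 then "error"
  else
    -- arr[front : len(arr)-back]: exact as drop/take here since 0 ≤ front and front+back ≤ len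
    let w := (arr1.drop st.2.1).take (arr1.length - st.2.2 - st.2.1)
    if w.isEmpty then "[]"
    else "[" ++ PySem.Str.join "," (if st.1 then w.reverse else w) ++ "]"

-- ===== PRECONDITION & SPEC =====
-- Pre_ excludes only the empty list: arr[0] raises IndexError in both A and B there.
def Pre_solution (p : String) (n : Int) (arr : List String) : Prop := arr ≠ []
instance (p : String) (n : Int) (arr : List String) : Decidable (Pre_solution p n arr) := by unfold Pre_solution; infer_instance

def pvWitness_solution : String × Int × List String := ("RDD", 3, ["1", "2", "3", "4"])

def Spec_solution (p : String) (n : Int) (arr : List String) (out : String) : Prop := out = solution_alt p n arr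
instance (p : String) (n : Int) (arr : List String) (out : String) : Decidable (Spec_solution p n arr out) := by unfold Spec_solution; infer_instance

-- ===== CLAIM (what is proved, stated in full; the proofs are below) =====
def Claim_equal_solution : Prop := ∀ (p : String) (n : Int) (arr : List String), Dom_solution p n arr → Pre_solution p n arr → Spec_solution p n arr (solution p n arr)

-- ===== LEMMAS AND PROOFS =====

-- direction and (front drops, back drops) determined by the op string alone
def cnt : List Char → Bool → Bool × Nat × Nat
  | [], d => (d, 0, 0)
  | c :: cs, d =>
    if c = 'R' then cnt cs (!d)
    else
      let r := cnt cs d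
      if d then (r.1, r.2.1, r.2.2 + 1) else (r.1, r.2.1 + 1, r.2.2)

lemma foldl_cnt : ∀ (cs : List Char) (d : Bool) (f b : Nat),
    cs.foldl (fun (st : Bool × Nat × Nat) c =>
      if c = 'R' then (!st.1, st.2.1, st.2.2)
      else if st.1 then (st.1, st.2.1, st.2.2 + 1)
      else (st.1, st.2.1 + 1, st.2.2)) (d, f, b)
    = ((cnt cs d).1, f + (cnt cs d).2.1, b + (cnt cs d).2.2) := by
  intro cs
  induction cs with
  | nil => intro d f b; simp [cnt]
  | cons c cs ih =>
    intro d f b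
    by_cases hc : c = 'R'
    · simp [cnt, hc, List.foldl_cons, ih]
    · cases d <;> simp [cnt, hc, List.foldl_cons, ih] <;> omega

lemma take_drop_dropLast {α : Type} (l : List α) (f k : Nat) (hk : k ≤ l.length - 1 - f) :
    (l.dropLast.drop f).take k = (l.drop f).take k := by
  rw [List.dropLast_eq_take, List.drop_take, List.take_take]
  congr 1
  omega

lemma aLoop_cnt : ∀ (cs : List Char) (d : Bool) (xs : List String),
    aLoop cs d xs =
      if xs.length < (cnt cs d).2.1 + (cnt cs d).2.2 then none
      else some ((cnt cs d).1,
        (xs.drop (cnt cs d).2.1).take (xs.length - (cnt cs d).2.2 - (cnt cs d).2.1)) := by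
  intro cs
  induction cs with
  | nil => intro d xs; simp [aLoop, cnt]
  | cons c cs ih =>
    intro d xs
    by_cases hc : c = 'R'
    · simp [aLoop, cnt, hc, ih]
    · cases d with
      | false =>
        rcases hr : cnt cs false with ⟨d', f', b'⟩
        cases xs with
        | nil =>
          simp only [aLoop, cnt, hc, if_false, Bool.false_eq_true, hr]
          rw [if_pos (by simp <;> omega)]
        | cons x t =>
          have ih' := ih false t
          rw [hr] at ih'
          simp only [aLoop, cnt, hc, if_false, Bool.false_eq_true, hr, ih',
            List.length_cons, List.drop_succ_cons]
          by_cases h2 : t.length < f' + b'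
          · rw [if_pos h2, if_pos (by omega)]
          · rw [if_neg h2, if_neg (by omega),
              show t.length + 1 - b' - (f' + 1) = t.length - b' - f' from by omega]
      | true =>
        rcases hr : cnt cs true with ⟨d', f', b'⟩
        cases xs with
        | nil =>
          simp only [aLoop, cnt, hc, if_false, if_true, hr]
          rw [if_pos (by simp <;> omega)]
        | cons x t =>
          have ih' := ih true (x :: t).dropLast
          rw [hr] at ih'
          simp only [aLoop, cnt, hc, if_false, if_true, hr, ih']
          have hl : (x :: t).dropLast.length = t.length := by simp
          rw [hl]
          by_cases h2 : t.length < f' + b'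
          · rw [if_pos h2, if_pos (by simp <;> omega)]
          · rw [if_neg h2, if_neg (by simp <;> omega),
              show (x :: t : List String).length - (b' + 1) - f' = t.length - b' - f' from by
                simp <;> omega,
              take_drop_dropLast _ _ _ (by simp <;> omega)]

lemma join_single (s x : String) : PySem.Str.join s [x] = x := by
  simp [PySem.Str.join, PySem.Chars.join_singleton, String.ofList_toList]

lemma join_cons (s a : String) (t : List String) (ht : t ≠ []) :
    PySem.Str.join s (a :: t) = a ++ s ++ PySem.Str.join s t := by
  obtain ⟨q, rest, rfl⟩ : ∃ q rest, t = q :: rest := by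
    cases t with
    | nil => exact absurd rfl ht
    | cons q rest => exact ⟨q, rest, rfl⟩
  show PySem.Str.join s (a :: q :: rest) = _
  rw [PySem.Str.join, List.map_cons, List.map_cons, PySem.Chars.join_cons_cons,
    String.ofList_append, String.ofList_append, String.ofList_toList, String.ofList_toList]
  simp [PySem.Str.join]

lemma modLast_ne_nil (a : String) (t : List String) : modLast (a :: t) ≠ [] := by
  cases t <;> simp [modLast]

lemma join_modLast : ∀ (t : List String) (a : String),
    PySem.Str.join "," (modLast (a :: t)) = PySem.Str.join "," (a :: t) ++ "]" := by
  intro t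
  induction t with
  | nil => intro a; simp [modLast, join_single]
  | cons b r ih =>
    intro a
    rw [show modLast (a :: b :: r) = a :: modLast (b :: r) from rfl,
      join_cons "," a (modLast (b :: r)) (modLast_ne_nil b r), ih b,
      join_cons "," a (b :: r) (by simp)]
    simp [String.append_assoc]

lemma join_head (a : String) (t : List String) :
    PySem.Str.join "," (("[" ++ a) :: t) = "[" ++ PySem.Str.join "," (a :: t) := by
  cases t with
  | nil => rw [join_single, join_single]
  | cons b r =>
    rw [join_cons "," ("[" ++ a) (b :: r) (by simp), join_cons "," a (b :: r) (by simp)]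
    simp [String.append_assoc]

lemma format_eq (ys : List String) (hys : ys ≠ []) :
    PySem.Str.join "," (modLast (ys.modifyHead (fun s => "[" ++ s)))
      = "[" ++ PySem.Str.join "," ys ++ "]" := by
  obtain ⟨a, t, rfl⟩ : ∃ a t, ys = a :: t := by
    cases ys with
    | nil => exact absurd rfl hys
    | cons a t => exact ⟨a, t, rfl⟩
  rw [List.modifyHead_cons, join_modLast, join_head]

-- ===== VERDICT (by name: the statement is the Claim_ definition above) =====
theorem solution_spec : Claim_equal_solution := by
  intro p n arr _ _
  unfold Spec_solution solution solution_alt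
  rcases h : cnt p.toList false with ⟨d, f, b⟩
  simp only [aLoop_cnt, foldl_cnt, h, Nat.zero_add]
  by_cases herr : (if arr.head? = some "" then ([] : List String) else arr).length < f + b
  · simp only [if_pos herr]
  · simp only [if_neg herr]
    by_cases hw : (((if arr.head? = some "" then ([] : List String) else arr).drop f).take
        ((if arr.head? = some "" then ([] : List String) else arr).length - b - f)).isEmpty
    · simp only [if_pos hw]
    · simp only [if_neg hw]
      rw [format_eq]
      cases d <;> simp_all [List.isEmpty_iff]
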